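-- pv_equiv track=rewrite | github.com/LepsyMikolaj3301/Matura__2023 | KURS MATURA INFORMATYKA 2023/zadanie_5.2.py | zadanie_5_2
-- ===== SOURCE A (Python) =====
-- def zadanie_5_2(tablic_dwuw: list) -> tuple:
--     suma_parz, suma_nieparz = 0, 0
--     for lista in tablic_dwuw:
--         for wartosc in lista:
--             if wartosc % 2 == 0:
--                 suma_parz += wartosc
--             else:
--                 suma_nieparz += wartosc
--     odpowiedzi = (suma_parz, suma_nieparz)
--     return odpowiedzi
-- ===== SOURCE B (Python) =====
-- def zadanie_5_2(tablic_dwuw: list) -> tuple: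
--     flat = [v for row in tablic_dwuw for v in row]
--     suma_parz = sum(v for v in flat if v % 2 == 0)
--     suma_nieparz = sum(v for v in flat if v % 2 != 0)
--     return (suma_parz, suma_nieparz)
-- ===== Notes on version B (the rewrite author's own statement) =====
-- stated objective: idiomatic
-- what changed: Replaces the single nested loop with an if/else accumulator pair by flattening the array once and computing each sum with its own filtered comprehension.
import Mathlib
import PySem

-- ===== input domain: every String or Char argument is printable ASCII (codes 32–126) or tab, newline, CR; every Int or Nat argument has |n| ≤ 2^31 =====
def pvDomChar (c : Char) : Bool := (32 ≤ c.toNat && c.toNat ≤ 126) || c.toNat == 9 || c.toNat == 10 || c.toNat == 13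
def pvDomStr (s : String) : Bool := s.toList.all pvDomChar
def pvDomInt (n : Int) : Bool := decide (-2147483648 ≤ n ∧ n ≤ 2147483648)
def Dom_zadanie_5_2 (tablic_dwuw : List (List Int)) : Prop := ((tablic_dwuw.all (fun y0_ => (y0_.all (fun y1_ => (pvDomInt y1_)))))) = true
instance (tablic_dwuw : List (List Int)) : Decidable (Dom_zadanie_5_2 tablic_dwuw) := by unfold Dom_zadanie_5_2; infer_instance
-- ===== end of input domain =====

-- B replaces A's single branched nested loop by a flatten followed by two filtered sums (idiomatic decomposition; return value only).

-- ===== PORT A =====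
-- nested loop with one (suma_parz, suma_nieparz) accumulator, branching on wartosc % 2 == 0
def zadanie_5_2 (tablic_dwuw : List (List Int)) : Int × Int :=
  let odpowiedzi :=
    tablic_dwuw.foldl (fun acc lista =>
      lista.foldl (fun acc wartosc =>
        if PySem.Int.mod wartosc 2 = 0 then (acc.1 + wartosc, acc.2)
        else (acc.1, acc.2 + wartosc)) acc) (0, 0)
  odpowiedzi

-- ===== PORT B =====
def zadanie_5_2_alt (tablic_dwuw : List (List Int)) : Int × Int :=
  let flat := tablic_dwuw.flatMap (fun row => row)
  let suma_parz := ((flat.filter (fun v => PySem.Int.mod v 2 = 0)).map id).sum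
  let suma_nieparz := ((flat.filter (fun v => PySem.Int.mod v 2 ≠ 0)).map id).sum
  (suma_parz, suma_nieparz)

-- ===== PRECONDITION & SPEC =====
def Spec_zadanie_5_2 (tablic_dwuw : List (List Int)) (out : Int × Int) : Prop := out = zadanie_5_2_alt tablic_dwuw
instance (tablic_dwuw : List (List Int)) (out : Int × Int) : Decidable (Spec_zadanie_5_2 tablic_dwuw out) := by unfold Spec_zadanie_5_2; infer_instance

-- ===== CLAIM (what is proved, stated in full; the proofs are below) =====
def Claim_equal_zadanie_5_2 : Prop := ∀ (tablic_dwuw : List (List Int)), Dom_zadanie_5_2 tablic_dwuw → Spec_zadanie_5_2 tablic_dwuw (zadanie_5_2 tablic_dwuw)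

-- ===== LEMMAS AND PROOFS =====

-- one flat list: the branched fold equals the pair of filtered sums, shifted by the start accumulator
theorem pv_flat_fold (xs : List Int) (a : Int × Int) :
    xs.foldl (fun acc wartosc =>
        if PySem.Int.mod wartosc 2 = 0 then (acc.1 + wartosc, acc.2)
        else (acc.1, acc.2 + wartosc)) a
    = (a.1 + ((xs.filter (fun v => PySem.Int.mod v 2 = 0)).map id).sum,
       a.2 + ((xs.filter (fun v => PySem.Int.mod v 2 ≠ 0)).map id).sum) := by
  induction xs generalizing a with
  | nil => simp
  | cons x xs ih =>
    by_cases h : PySem.Int.mod x 2 = 0 <;>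
      simp only [List.foldl_cons, List.filter_cons, h, decide_true, decide_false, ne_eq,
        not_true_eq_false, not_false_eq_true, if_true, if_false, ih,
        List.map_cons, List.sum_cons, List.map_id, Prod.mk.injEq] <;>
      constructor <;> simp <;> ring

-- the nested fold over rows equals the fold over the flattened list
theorem pv_nested_eq_flat (rows : List (List Int)) (a : Int × Int) :
    rows.foldl (fun acc lista =>
      lista.foldl (fun acc wartosc =>
        if PySem.Int.mod wartosc 2 = 0 then (acc.1 + wartosc, acc.2)
        else (acc.1, acc.2 + wartosc)) acc) a
    = (rows.flatMap (fun row => row)).foldl (fun acc wartosc =>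
        if PySem.Int.mod wartosc 2 = 0 then (acc.1 + wartosc, acc.2)
        else (acc.1, acc.2 + wartosc)) a := by
  induction rows generalizing a with
  | nil => simp
  | cons r rs ih =>
    simp only [List.flatMap_cons, List.foldl_append, List.foldl_cons, ih]

-- ===== VERDICT (by name: the statement is the Claim_ definition above) =====
theorem zadanie_5_2_spec : Claim_equal_zadanie_5_2 := by
  intro t _
  show zadanie_5_2 t = zadanie_5_2_alt t
  simp only [zadanie_5_2, zadanie_5_2_alt]
  rw [pv_nested_eq_flat, pv_flat_fold]
  simp
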